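-- pv_equiv track=rewrite | github.com/AgoraIO/agora_doc_source | update-comment/api_comment_updater/src/utils/text_utils.py | _wrap_comment_line
-- ===== SOURCE A (Python) =====
-- from typing import List, Dict, Any
--
-- def _wrap_comment_line(text: str, prefix: str = " * ", max_line_length: int = 100) -> List[str]:
--     """
--     将单行文本按照指定长度换行，保持单词完整性
--
--     Args:
--         text: 要换行的文本
--         prefix: 每行的前缀
--         max_line_length: 最大行长度
--
--     Returns:
--         List[str]: 换行后的行列表
--     """
--     if not text:
--         return [prefix]
--
--     # 检查是否是表格行，表格行不进行换行处理
--     if '|' in text and text.count('|') >= 2: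
--         # 表格行（包括分隔符行），直接返回不换行
--         return [f"{prefix}{text}"]
--
--     # 如果当前行（包含前缀）不超过限制，直接返回
--     full_line = f"{prefix}{text}"
--     if len(full_line) <= max_line_length:
--         return [full_line]
--
--     # 需要换行处理
--     result_lines = []
--     remaining_text = text
--
--     while remaining_text:
--         # 计算当前行可用的文本宽度
--         available_width = max_line_length - len(prefix)
--
--         if len(remaining_text) <= available_width:
--             # 剩余文本可以放在一行内
--             result_lines.append(f"{prefix}{remaining_text}")
--             break
--
--         # 找到合适的断行点
--         break_point = _find_line_break_point(remaining_text, available_width)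
--
--         if break_point <= 0:
--             # 无法找到合适的断行点，强制在可用宽度处断行
--             break_point = available_width
--
--         # 添加当前行
--         current_line_text = remaining_text[:break_point].rstrip()
--         result_lines.append(f"{prefix}{current_line_text}")
--
--         # 更新剩余文本
--         remaining_text = remaining_text[break_point:].lstrip()
--
--     return result_lines
--
-- def _find_line_break_point(text: str, max_width: int) -> int:
--     """
--     在指定宽度内找到最佳的断行点
--
--     Args:
--         text: 文本
--         max_width: 最大宽度
--
--     Returns:
--         int: 断行点位置
--     """
--     if len(text) <= max_width:
--         return len(text)
--
--     # 在最大宽度内寻找最后一个空格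
--     for i in range(max_width, 0, -1):
--         if text[i] == ' ':
--             return i
--
--     # 如果没有空格，寻找标点符号
--     for i in range(max_width, 0, -1):
--         if text[i] in '.,;:!?':
--             return i + 1
--
--     # 如果没有标点符号，寻找连字符
--     for i in range(max_width, 0, -1):
--         if text[i] == '-':
--             return i + 1
--
--     # 如果都没有找到，返回0表示无法在此处断行
--     return 0
-- ===== SOURCE B (Python) =====
-- from typing import List
--
--
-- def _break_point(text: str, width: int) -> int:
--     """Single backward pass over indices width..1 recording the best candidates."""
--     punct = None
--     hyph = None
--     for i in range(width, 0, -1):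
--         c = text[i]
--         if c == ' ':
--             return i
--         if punct is None and c in '.,;:!?':
--             punct = i
--         if hyph is None and c == '-':
--             hyph = i
--     if punct is not None:
--         return punct + 1
--     if hyph is not None:
--         return hyph + 1
--     return width
--
--
-- def _wrap_comment_line(text: str, prefix: str = " * ", max_line_length: int = 100) -> List[str]:
--     if not text:
--         return [prefix]
--     if text.count('|') >= 2:
--         return [prefix + text]
--     if len(prefix) + len(text) <= max_line_length:
--         return [prefix + text]
--     width = max_line_length - len(prefix)
--     lines = []
--     rem = text
--     while len(rem) > width:
--         bp = _break_point(rem, width)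
--         lines.append(prefix + rem[:bp].rstrip())
--         rem = rem[bp:].lstrip()
--         if not rem:
--             return lines
--     lines.append(prefix + rem)
--     return lines
-- ===== Notes on version B (the rewrite author's own statement) =====
-- stated objective: simpler
-- what changed: The three repeated backward scans of _find_line_break_point are replaced by one backward pass that returns at the first space and records the first punctuation and hyphen positions, and the wrapper's guards are collapsed (the redundant membership test before the pipe-count check is dropped, the prefixed length is computed arithmetically) with a simplified loop shape.
-- outside the precondition, e.g. on _wrap_comment_line('a    ', 'xxx', 2): A returns ['xxxa'], B returns ['xxxa']
import Mathlib
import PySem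

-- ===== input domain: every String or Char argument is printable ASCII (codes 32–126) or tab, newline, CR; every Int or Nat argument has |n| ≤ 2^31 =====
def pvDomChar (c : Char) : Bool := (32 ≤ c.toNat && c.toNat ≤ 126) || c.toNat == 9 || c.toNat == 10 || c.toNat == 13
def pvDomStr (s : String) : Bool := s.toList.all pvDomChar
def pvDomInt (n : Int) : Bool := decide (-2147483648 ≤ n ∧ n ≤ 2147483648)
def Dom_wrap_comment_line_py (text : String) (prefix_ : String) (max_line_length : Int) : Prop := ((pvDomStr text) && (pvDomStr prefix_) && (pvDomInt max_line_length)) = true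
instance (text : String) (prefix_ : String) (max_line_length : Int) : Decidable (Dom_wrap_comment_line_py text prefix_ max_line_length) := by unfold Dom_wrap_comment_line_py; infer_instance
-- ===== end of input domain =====

-- B collapses _find_line_break_point's three repeated backward scans into one backward pass
-- (simpler); same wrapping loop result, guards simplified.

-- ===== PORT A =====

-- port of _find_line_break_point: three successive backward scans of range(max_width, 0, -1)
def pvFindA (text : List Char) (maxWidth : Int) : Int :=
  if (text.length : Int) ≤ maxWidth then (text.length : Int)
  else
    match (PySem.List.pyRange maxWidth 0 (-1)).find?
        (fun i => PySem.List.pyGet? text i == some ' ') with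
    | some i => i
    | none =>
      match (PySem.List.pyRange maxWidth 0 (-1)).find?
          (fun i => match PySem.List.pyGet? text i with
                    | some c => decide (c ∈ ['.', ',', ';', ':', '!', '?'])
                    | none => false) with
      | some i => i + 1
      | none =>
        match (PySem.List.pyRange maxWidth 0 (-1)).find?
            (fun i => PySem.List.pyGet? text i == some '-') with
        | some i => i + 1
        | none => 0

-- port of A's while-loop (fuel = |text| + 1 suffices on Pre_, where each step strictly shrinks the text)
def pvLoopA (prefix_ : List Char) (maxLen : Int) : Nat → List (List Char) → List Char → List (List Char)
  | 0, acc, _ => acc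
  | f + 1, acc, rem =>
    if rem.isEmpty then acc
    else
      let avail := maxLen - (prefix_.length : Int)
      if (rem.length : Int) ≤ avail then acc ++ [prefix_ ++ rem]
      else
        let bp0 := pvFindA rem avail
        let bp := if bp0 ≤ 0 then avail else bp0
        let cur := PySem.Chars.rstrip (PySem.List.slice rem none (some bp))
        pvLoopA prefix_ maxLen f (acc ++ [prefix_ ++ cur])
          (PySem.Chars.lstrip (PySem.List.slice rem (some bp) none))

def wrap_comment_line_py (text : String) (prefix_ : String) (max_line_length : Int) : List String :=
  let t := text.toList
  let p := prefix_.toList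
  if t.isEmpty then [prefix_]
  else if PySem.Chars.isIn ['|'] t && 2 ≤ PySem.Chars.count t ['|'] then [String.ofList (p ++ t)]
  else if ((p ++ t).length : Int) ≤ max_line_length then [String.ofList (p ++ t)]
  else (pvLoopA p max_line_length (t.length + 1) [] t).map String.ofList

-- ===== PORT B =====

-- port of B's _break_point: ONE backward pass, returning at the first space, recording
-- the first punctuation and hyphen positions seen
def pvBpGo (text : List Char) (width : Int) : List Int → Option Int → Option Int → Int
  | [], punct, hyph =>
    match punct with
    | some j => j + 1
    | none =>
      match hyph with
      | some j => j + 1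
      | none => width
  | i :: rest, punct, hyph =>
    match PySem.List.pyGet? text i with
    | some c =>
      if c = ' ' then i
      else
        let punct' := if punct = none ∧ c ∈ ['.', ',', ';', ':', '!', '?'] then some i else punct
        let hyph' := if hyph = none ∧ c = '-' then some i else hyph
        pvBpGo text width rest punct' hyph'
    | none => pvBpGo text width rest punct hyph  -- text[i] out of range: unreachable on Pre_

def pvBreakPointB (text : List Char) (width : Int) : Int :=
  pvBpGo text width (PySem.List.pyRange width 0 (-1)) none none

-- port of B's while-loop (same fuel convention as A's port)
def pvLoopB (prefix_ : List Char) (width : Int) : Nat → List (List Char) → List Char → List (List Char)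
  | 0, acc, _ => acc
  | f + 1, acc, rem =>
    if width < (rem.length : Int) then
      let bp := pvBreakPointB rem width
      let acc' := acc ++ [prefix_ ++ PySem.Chars.rstrip (PySem.List.slice rem none (some bp))]
      let rem' := PySem.Chars.lstrip (PySem.List.slice rem (some bp) none)
      if rem'.isEmpty then acc' else pvLoopB prefix_ width f acc' rem'
    else acc ++ [prefix_ ++ rem]

def wrap_comment_line_py_alt (text : String) (prefix_ : String) (max_line_length : Int) : List String :=
  let t := text.toList
  let p := prefix_.toList
  if t.isEmpty then [prefix_]
  else if 2 ≤ PySem.Chars.count t ['|'] then [String.ofList (p ++ t)]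
  else if (p.length : Int) + (t.length : Int) ≤ max_line_length then [String.ofList (p ++ t)]
  else pvLoopB p (max_line_length - (p.length : Int)) (t.length + 1) [] t |>.map String.ofList

-- ===== PRECONDITION & SPEC =====
-- Pre_ admits every input that returns without entering the wrap loop (empty text, a table
-- row, a line that already fits) and, for the loop, requires a positive available width
-- (max_line_length - len(prefix) ≥ 1): with a non-positive available width A's while-loop
-- generally never terminates (the remaining text stops shrinking); it returns only
-- accidentally, when stripping happens to empty the remainder, and those inputs are excluded too.
def Pre_wrap_comment_line_py (text : String) (prefix_ : String) (max_line_length : Int) : Prop :=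
  text.toList = [] ∨ 2 ≤ PySem.Chars.count text.toList ['|'] ∨
  (prefix_.toList.length : Int) + (text.toList.length : Int) ≤ max_line_length ∨
  (prefix_.toList.length : Int) + 1 ≤ max_line_length
instance (text : String) (prefix_ : String) (max_line_length : Int) : Decidable (Pre_wrap_comment_line_py text prefix_ max_line_length) := by unfold Pre_wrap_comment_line_py; infer_instance

def pvWitness_wrap_comment_line_py : String × String × Int := ("hello brave new world", " * ", 12)

def Spec_wrap_comment_line_py (text : String) (prefix_ : String) (max_line_length : Int) (out : List String) : Prop := out = wrap_comment_line_py_alt text prefix_ max_line_length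
instance (text : String) (prefix_ : String) (max_line_length : Int) (out : List String) : Decidable (Spec_wrap_comment_line_py text prefix_ max_line_length out) := by unfold Spec_wrap_comment_line_py; infer_instance

-- ===== CLAIM (what is proved, stated in full; the proofs are below) =====
def Claim_equal_wrap_comment_line_py : Prop := ∀ (text : String) (prefix_ : String) (max_line_length : Int), Dom_wrap_comment_line_py text prefix_ max_line_length → Pre_wrap_comment_line_py text prefix_ max_line_length → Spec_wrap_comment_line_py text prefix_ max_line_length (wrap_comment_line_py text prefix_ max_line_length)

-- ===== LEMMAS AND PROOFS =====

-- membership in range(width, 0, -1)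
lemma pv_mem_range_down {w i : Int} (h : i ∈ PySem.List.pyRange w 0 (-1)) : 1 ≤ i ∧ i ≤ w := by
  simp [PySem.List.pyRange] at h
  obtain ⟨k, hk, rfl⟩ := h
  split at hk
  · next hpos => simp at hk; omega
  · simp at hk

-- count ≥ 2 implies an occurrence, hence the membership test A also performs
lemma pv_count_go_infix (sub : List Char) : ∀ (fuel : Nat) (s : List Char) (acc : Nat),
    acc + 1 ≤ PySem.Chars.count.go sub fuel s acc → sub <:+: s := by
  intro fuel
  induction fuel with
  | zero => intro s acc h; simp [PySem.Chars.count.go] at h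
  | succ f ih =>
    intro s acc h
    match s with
    | [] => simp [PySem.Chars.count.go] at h
    | c :: t =>
      rw [PySem.Chars.count.go] at h
      split at h
      · next hp => exact List.IsPrefix.isInfix (List.isPrefixOf_iff_prefix.mp hp)
      · exact (ih t acc h).trans (List.IsSuffix.isInfix (List.suffix_cons c t))

lemma pv_isIn_of_count {t : List Char} (h : 2 ≤ PySem.Chars.count t ['|']) :
    PySem.Chars.isIn ['|'] t = true := by
  rw [PySem.Chars.isIn_iff_infix]
  unfold PySem.Chars.count at h
  simp at h
  exact pv_count_go_infix ['|'] t.length t 0 (by omega)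

-- characterisation of B's single pass by A's three scans
lemma pv_bpGo_spec (text : List Char) (width : Int) (l : List Int) (p h : Option Int) :
    pvBpGo text width l p h =
      match l.find? (fun i => PySem.List.pyGet? text i == some ' ') with
      | some i => i
      | none =>
        match p.or (l.find? (fun i => match PySem.List.pyGet? text i with
                    | some c => decide (c ∈ ['.', ',', ';', ':', '!', '?'])
                    | none => false)) with
        | some j => j + 1
        | none =>
          match h.or (l.find? (fun i => PySem.List.pyGet? text i == some '-')) with
          | some j => j + 1
          | none => width := by
  induction l generalizing p h with
  | nil => simp [pvBpGo]
  | cons i rest ih =>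
    rw [pvBpGo]
    match hg : PySem.List.pyGet? text i with
    | none =>
      rw [ih]
      simp [hg]
    | some c =>
      by_cases hsp : c = ' '
      · subst hsp
        simp [hg]
      · simp only [List.find?_cons, hg]
        have hbeq : (some c == some ' ') = false := by simp [hsp]
        rw [if_neg hsp]
        simp only [hbeq]
        rw [ih]
        by_cases hpu : c ∈ ['.', ',', ';', ':', '!', '?']
        · have hnd : c ≠ '-' := by fin_cases hpu <;> decide
          simp [hpu, hnd]
          cases p <;> simp [Option.or]
        · by_cases hhy : c = '-'
          · simp [hhy]
            cases h <;> cases p <;> simp [Option.or]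
          · have h1 : (some c == some '-') = false := by simp [hhy]
            simp [hpu, hhy, h1]

-- A's forced break point equals B's break point
lemma pv_break_eq (text : List Char) (width : Int) (_hw : 1 ≤ width)
    (hlen : width < (text.length : Int)) :
    (if pvFindA text width ≤ 0 then width else pvFindA text width) = pvBreakPointB text width := by
  have hg : ¬ ((text.length : Int) ≤ width) := by omega
  rw [pvBreakPointB, pv_bpGo_spec]
  simp only [Option.none_or]
  unfold pvFindA
  rw [if_neg hg]
  rcases hs : List.find? (fun i => PySem.List.pyGet? text i == some ' ')
      (PySem.List.pyRange width 0 (-1)) with _ | i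
  · rcases hp : List.find? (fun i => match PySem.List.pyGet? text i with
        | some c => decide (c ∈ ['.', ',', ';', ':', '!', '?'])
        | none => false) (PySem.List.pyRange width 0 (-1)) with _ | j
    · rcases hh : List.find? (fun i => PySem.List.pyGet? text i == some '-')
          (PySem.List.pyRange width 0 (-1)) with _ | k
      · simp
      · have := pv_mem_range_down (List.mem_of_find?_eq_some hh)
        simp
        intro hk
        omega
    · have := pv_mem_range_down (List.mem_of_find?_eq_some hp)
      simp
      intro hk
      omega
  · have := pv_mem_range_down (List.mem_of_find?_eq_some hs)
    simp
    intro hk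
    omega

lemma pv_bp_pos (text : List Char) (width : Int) (hw : 1 ≤ width) :
    1 ≤ pvBreakPointB text width := by
  rw [pvBreakPointB, pv_bpGo_spec]
  simp only [Option.none_or]
  rcases hs : List.find? (fun i => PySem.List.pyGet? text i == some ' ')
      (PySem.List.pyRange width 0 (-1)) with _ | i
  · rcases hp : List.find? (fun i => match PySem.List.pyGet? text i with
        | some c => decide (c ∈ ['.', ',', ';', ':', '!', '?'])
        | none => false) (PySem.List.pyRange width 0 (-1)) with _ | j
    · rcases hh : List.find? (fun i => PySem.List.pyGet? text i == some '-')
          (PySem.List.pyRange width 0 (-1)) with _ | k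
      · simpa using hw
      · have := pv_mem_range_down (List.mem_of_find?_eq_some hh)
        simp
        omega
    · have := pv_mem_range_down (List.mem_of_find?_eq_some hp)
      simp
      omega
  · have := pv_mem_range_down (List.mem_of_find?_eq_some hs)
    simpa using this.1

lemma pv_lstrip_length_le (l : List Char) : (PySem.Chars.lstrip l).length ≤ l.length := by
  simpa [PySem.Chars.lstrip] using List.length_dropWhile_le _ l

-- the two wrap loops agree, given enough fuel and positive available width
lemma pv_loop_eq (p : List Char) (maxLen : Int) (hw : (p.length : Int) + 1 ≤ maxLen) :
    ∀ (f : Nat) (acc : List (List Char)) (rem : List Char), rem ≠ [] → rem.length ≤ f →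
      pvLoopA p maxLen f acc rem = pvLoopB p (maxLen - (p.length : Int)) f acc rem := by
  intro f
  induction f with
  | zero => intro acc rem hne hle; exact absurd (List.length_eq_zero_iff.mp (by omega)) hne
  | succ f ih =>
    intro acc rem hne hle
    rw [pvLoopA, pvLoopB]
    rw [if_neg (by simpa [List.isEmpty_iff] using hne)]
    set width := maxLen - (p.length : Int) with hwdef
    have hw1 : 1 ≤ width := by omega
    by_cases hfit : (rem.length : Int) ≤ width
    · rw [if_pos hfit, if_neg (by omega)]
    · rw [if_neg hfit, if_pos (by omega)]
      dsimp only
      have hlong : width < (rem.length : Int) := by omega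
      rw [pv_break_eq rem width hw1 hlong]
      set bp := pvBreakPointB rem width with hbp
      have hbp1 : 1 ≤ bp := pv_bp_pos rem width hw1
      have hrem' : (PySem.Chars.lstrip (PySem.List.slice rem (some bp) none)).length ≤ rem.length - 1 := by
        have h1 := pv_lstrip_length_le (PySem.List.slice rem (some bp) none)
        have h2 : (PySem.List.slice rem (some bp) none).length = rem.length - bp.toNat := by
          rw [PySem.List.slice_from rem (show (0:Int) ≤ bp from by omega)]
          exact List.length_drop ..
        omega
      by_cases hemp : (PySem.Chars.lstrip (PySem.List.slice rem (some bp) none)).isEmpty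
      · rw [if_pos hemp]
        have : PySem.Chars.lstrip (PySem.List.slice rem (some bp) none) = [] :=
          List.isEmpty_iff.mp hemp
        rw [this]
        have hf1 : 1 ≤ f := by
          have : 2 ≤ rem.length := by omega
          omega
        obtain ⟨f', rfl⟩ : ∃ f', f = f' + 1 := ⟨f - 1, by omega⟩
        rw [pvLoopA]
        simp
      · rw [if_neg hemp]
        exact ih _ _ (by simpa [List.isEmpty_iff] using hemp) (by omega)

-- ===== VERDICT (by name: the statement is the Claim_ definition above) =====
theorem wrap_comment_line_py_spec : Claim_equal_wrap_comment_line_py := by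
  intro text prefix_ maxLen _ hpre
  unfold Spec_wrap_comment_line_py wrap_comment_line_py wrap_comment_line_py_alt
  set t := text.toList with ht
  set p := prefix_.toList with hp
  by_cases hemp : t.isEmpty
  · rw [if_pos hemp, if_pos hemp]
  · rw [if_neg hemp, if_neg hemp]
    by_cases htab : 2 ≤ PySem.Chars.count t ['|']
    · rw [if_pos htab, if_pos (by simp [pv_isIn_of_count htab, htab])]
    · rw [if_neg htab, if_neg (by simp [htab])]
      have hlenapp : (((p ++ t).length : Int)) = (p.length : Int) + (t.length : Int) := by
        simp
      by_cases hfit : (p.length : Int) + (t.length : Int) ≤ maxLen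
      · rw [if_pos hfit, if_pos (by omega)]
      · rw [if_neg hfit, if_neg (by omega)]
        have hne : t ≠ [] := by simpa [List.isEmpty_iff] using hemp
        have hw : (p.length : Int) + 1 ≤ maxLen := by
          rcases hpre with h1 | h2 | h3 | h4
          · exact absurd h1 hne
          · exact absurd h2 htab
          · exact absurd h3 hfit
          · exact h4
        rw [pv_loop_eq p maxLen hw (t.length + 1) [] t hne (by omega)]

-- a concrete input satisfying Dom and Pre (behavioural anchor)
theorem pv_witness_ok :
    Dom_wrap_comment_line_py pvWitness_wrap_comment_line_py.1 pvWitness_wrap_comment_line_py.2.1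
        pvWitness_wrap_comment_line_py.2.2 ∧
      Pre_wrap_comment_line_py pvWitness_wrap_comment_line_py.1 pvWitness_wrap_comment_line_py.2.1
        pvWitness_wrap_comment_line_py.2.2 := by
  decide
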